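-- pv_equiv track=rewrite | github.com/pypi-data/pypi-mirror-99 | packages/iehf/iehf-0.0.1.tar.gz/iehf-0.0.1/iehf/src/iehf.py | html_text_augment
-- ===== SOURCE A (Python) =====
-- def html_text_augment(x, methods):
--     tags = {
--         'bold': 'b',
--         'italics': 'i'
--     }
--
--     for m in methods:
--         x  = f"<{tags[m]}>{x}</{tags[m]}>"
--     return x
-- ===== SOURCE B (Python) =====
-- def html_text_augment(x, methods):
--     tags = {
--         'bold': 'b',
--         'italics': 'i'
--     }
--     opens = []
--     closes = []
--     for m in methods:
--         t = tags[m]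
--         opens.append(f"<{t}>")
--         closes.append(f"</{t}>")
--     if not opens:
--         return x
--     return ''.join(reversed(opens)) + f"{x}" + ''.join(closes)
-- ===== Notes on version B (the rewrite author's own statement) =====
-- stated objective: alternative
-- what changed: B collects opening and closing tag fragments into two lists in one pass and joins them around x once, instead of re-nesting the whole string on every iteration.
import Mathlib
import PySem

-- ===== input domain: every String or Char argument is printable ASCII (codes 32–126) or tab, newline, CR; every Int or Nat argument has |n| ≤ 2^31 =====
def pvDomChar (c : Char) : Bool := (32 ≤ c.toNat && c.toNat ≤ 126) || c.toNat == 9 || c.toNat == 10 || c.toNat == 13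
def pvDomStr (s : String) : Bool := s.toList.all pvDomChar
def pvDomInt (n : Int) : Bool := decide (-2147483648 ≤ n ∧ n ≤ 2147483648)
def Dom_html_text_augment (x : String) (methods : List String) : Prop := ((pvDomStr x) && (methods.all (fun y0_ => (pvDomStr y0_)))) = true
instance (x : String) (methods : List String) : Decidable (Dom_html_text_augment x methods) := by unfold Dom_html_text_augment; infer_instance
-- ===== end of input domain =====

-- B builds the wrapper from two fragment lists (opens reversed, closes forward) joined once
-- around x, instead of A's repeated re-nesting of the whole string (objective: alternative).


-- the dict literal 'tags' (both Pythons define the same one)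
def pvTags : PySem.Dict String String := PySem.Dict.ofList [("bold", "b"), ("italics", "i")]

-- ===== PORT A =====
-- A's loop re-wraps x once per method; tags[m] raises KeyError on an unknown key,
-- modelled by the Option state (none = raised; Pre_ excludes exactly those inputs).
def html_text_augment (x : String) (methods : List String) : String :=
  (methods.foldl
    (fun acc m => acc.bind fun s =>
      (PySem.Dict.get? pvTags m).map fun t => "<" ++ t ++ ">" ++ s ++ "</" ++ t ++ ">")
    (some x)).getD ""

-- ===== PORT B =====
-- Source B: one pass appending to opens/closes; the KeyError (none) case is unreachable under Pre_.
def html_text_augment_alt (x : String) (methods : List String) : String :=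
  let oc := methods.foldl
    (fun (p : List String × List String) m =>
      match PySem.Dict.get? pvTags m with
      | some t => (p.1 ++ ["<" ++ t ++ ">"], p.2 ++ ["</" ++ t ++ ">"])
      | none => p)
    ([], [])
  if oc.1 = [] then x
  else PySem.Str.join "" oc.1.reverse ++ x ++ PySem.Str.join "" oc.2

-- ===== PRECONDITION & SPEC =====
-- Pre_ excludes exactly the inputs on which A raises KeyError (a method other than 'bold'/'italics').
def Pre_html_text_augment (x : String) (methods : List String) : Prop :=
  ∀ m ∈ methods, m = "bold" ∨ m = "italics"
instance (x : String) (methods : List String) : Decidable (Pre_html_text_augment x methods) := by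
  unfold Pre_html_text_augment; infer_instance
def pvWitness_html_text_augment : String × List String := ("hi", ["bold", "italics"])

def Spec_html_text_augment (x : String) (methods : List String) (out : String) : Prop := out = html_text_augment_alt x methods
instance (x : String) (methods : List String) (out : String) : Decidable (Spec_html_text_augment x methods out) := by unfold Spec_html_text_augment; infer_instance

-- ===== CLAIM (what is proved, stated in full; the proofs are below) =====
def Claim_equal_html_text_augment : Prop := ∀ (x : String) (methods : List String), Dom_html_text_augment x methods → Pre_html_text_augment x methods → Spec_html_text_augment x methods (html_text_augment x methods)

-- ===== LEMMAS AND PROOFS =====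

-- the tag string looked up for a valid method
def pvTag (m : String) : String := if m = "bold" then "b" else "i"

lemma get_pvTags {m : String} (h : m = "bold" ∨ m = "italics") :
    PySem.Dict.get? pvTags m = some (pvTag m) := by
  rcases h with h | h <;> subst h <;> decide

lemma chars_intercalate_empty_cons (a : List Char) (l : List (List Char)) :
    ([] : List Char).intercalate (a :: l) = a ++ ([] : List Char).intercalate l := by
  cases l <;> simp [List.intercalate, List.intersperse]

lemma join_empty_cons (s : String) (l : List String) :
    PySem.Str.join "" (s :: l) = s ++ PySem.Str.join "" l := by
  simp [PySem.Str.join, PySem.Chars.join, chars_intercalate_empty_cons, String.ofList_append]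

lemma join_empty_nil : PySem.Str.join "" ([] : List String) = "" := by decide

lemma join_empty_append_singleton (l : List String) (s : String) :
    PySem.Str.join "" (l ++ [s]) = PySem.Str.join "" l ++ s := by
  induction l with
  | nil => simp [join_empty_cons, join_empty_nil]
  | cons a t ih => rw [List.cons_append, join_empty_cons, join_empty_cons, ih, String.append_assoc]

lemma afold (ms : List String) (h : ∀ m ∈ ms, m = "bold" ∨ m = "italics") (x : String) :
    ms.foldl
      (fun acc m => acc.bind fun s =>
        (PySem.Dict.get? pvTags m).map fun t => "<" ++ t ++ ">" ++ s ++ "</" ++ t ++ ">")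
      (some x)
    = some (PySem.Str.join "" (ms.map (fun m => "<" ++ pvTag m ++ ">")).reverse ++ x
            ++ PySem.Str.join "" (ms.map (fun m => "</" ++ pvTag m ++ ">"))) := by
  induction ms generalizing x with
  | nil => simp [join_empty_nil]
  | cons m t ih =>
      have hm := h m (List.mem_cons_self ..)
      rw [List.foldl_cons]
      simp only [get_pvTags hm, Option.bind_some, Option.map_some]
      rw [ih (fun a ha => h a (List.mem_cons_of_mem _ ha))]
      simp only [List.map_cons, List.reverse_cons, join_empty_append_singleton, join_empty_cons]
      simp [String.append_assoc]

lemma bfold (ms : List String) (h : ∀ m ∈ ms, m = "bold" ∨ m = "italics")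
    (a b : List String) :
    ms.foldl
      (fun (p : List String × List String) m =>
        match PySem.Dict.get? pvTags m with
        | some t => (p.1 ++ ["<" ++ t ++ ">"], p.2 ++ ["</" ++ t ++ ">"])
        | none => p)
      (a, b)
    = (a ++ ms.map (fun m => "<" ++ pvTag m ++ ">"), b ++ ms.map (fun m => "</" ++ pvTag m ++ ">")) := by
  induction ms generalizing a b with
  | nil => simp
  | cons m t ih =>
      have hm := h m (List.mem_cons_self ..)
      rw [List.foldl_cons]
      simp only [get_pvTags hm]
      rw [ih (fun a ha => h a (List.mem_cons_of_mem _ ha))]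
      simp

-- ===== VERDICT (by name: the statement is the Claim_ definition above) =====
theorem html_text_augment_spec : Claim_equal_html_text_augment := by
  intro x methods _ hpre
  unfold Spec_html_text_augment html_text_augment html_text_augment_alt
  rw [afold methods hpre, bfold methods hpre]
  cases methods with
  | nil => simp [join_empty_nil]
  | cons m t => simp
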